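-- pv_equiv track=rewrite | github.com/cmatthew11/Biowaste-to-energy_techno-economic_modelling | 2. CVRP waste collection clustering with recursive DBCAN clustering.py | update_clusters
-- ===== SOURCE A (Python) =====
-- def update_clusters(old_list,new_list,update_val):
--     _len = len(old_list)
--     # assert len(new_list) == sum([i==update_val for i in old_list])
--     out = []
--     count = 0
--     for old in old_list:
--         if old==update_val:
--             out.append(new_list[count])
--             count+=1
--         else:
--             out.append(old)
--     assert len(out) == _len
--     return out
-- ===== SOURCE B (Python) =====
-- def update_clusters(old_list, new_list, update_val):
--     positions = [i for i, x in enumerate(old_list) if x == update_val]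
--     out = list(old_list)
--     for i, pos in enumerate(positions):
--         out[pos] = new_list[i]
--     return out
-- ===== Notes on version B (the rewrite author's own statement) =====
-- stated objective: alternative
-- what changed: B first collects the indices of the marked elements, then overwrites a copy of old_list at exactly those positions with new_list values by index, instead of A's single pass that appends to a fresh list while advancing a counter.
import Mathlib
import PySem

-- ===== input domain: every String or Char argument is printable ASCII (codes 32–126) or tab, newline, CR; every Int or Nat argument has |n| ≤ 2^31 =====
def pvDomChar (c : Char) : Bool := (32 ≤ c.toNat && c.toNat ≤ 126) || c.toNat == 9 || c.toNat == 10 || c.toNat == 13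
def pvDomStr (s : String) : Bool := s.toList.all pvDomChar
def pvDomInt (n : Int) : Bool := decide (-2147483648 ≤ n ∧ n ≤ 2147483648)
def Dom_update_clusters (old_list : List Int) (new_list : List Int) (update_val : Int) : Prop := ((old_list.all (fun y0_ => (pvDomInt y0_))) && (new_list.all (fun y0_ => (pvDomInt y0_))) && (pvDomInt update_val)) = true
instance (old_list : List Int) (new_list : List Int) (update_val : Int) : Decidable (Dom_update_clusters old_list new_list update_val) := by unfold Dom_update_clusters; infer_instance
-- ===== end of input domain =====

-- B collects the marked positions first and then overwrites a copy of old_list at those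
-- positions by index, instead of A's single appending pass with a running counter.

-- ===== PORT A =====
-- literal port of A: one pass appending, counter indexes into new_list (assert dropped: always true)
def update_clusters (old_list : List Int) (new_list : List Int) (update_val : Int) : List Int :=
  (old_list.foldl
    (fun st old =>
      if old == update_val then (st.1 ++ [PySem.List.pyGetD new_list st.2 0], st.2 + 1)
      else (st.1 ++ [old], st.2))
    (([] : List Int), (0 : Int))).1

-- ===== PORT B =====
-- literal port of Source B: positions pass, then indexed assignments into a copy of old_list
def update_clusters_alt (old_list : List Int) (new_list : List Int) (update_val : Int) : List Int :=
  let positions := ((PySem.List.enumerate old_list).filter (fun p => p.2 == update_val)).map Prod.fst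
  (PySem.List.enumerate positions).foldl
    (fun out ip => PySem.List.pySetD out ip.2 (PySem.List.pyGetD new_list ip.1 0))
    old_list

-- ===== PRECONDITION & SPEC =====
-- Pre_ excludes exactly the inputs on which both Pythons raise IndexError (fewer new values
-- than marked elements); the Lean ports are total via a default that the claim never relies on.
def Pre_update_clusters (old_list : List Int) (new_list : List Int) (update_val : Int) : Prop :=
  old_list.count update_val ≤ new_list.length
instance (old_list : List Int) (new_list : List Int) (update_val : Int) : Decidable (Pre_update_clusters old_list new_list update_val) := by unfold Pre_update_clusters; infer_instance

def pvWitness_update_clusters : List Int × List Int × Int := ([1, 2, 1, 3], [7, 8], 1)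

def Spec_update_clusters (old_list : List Int) (new_list : List Int) (update_val : Int) (out : List Int) : Prop := out = update_clusters_alt old_list new_list update_val
instance (old_list : List Int) (new_list : List Int) (update_val : Int) (out : List Int) : Decidable (Spec_update_clusters old_list new_list update_val out) := by unfold Spec_update_clusters; infer_instance

-- ===== CLAIM (what is proved, stated in full; the proofs are below) =====
def Claim_equal_update_clusters : Prop := ∀ (old_list : List Int) (new_list : List Int) (update_val : Int), Dom_update_clusters old_list new_list update_val → Pre_update_clusters old_list new_list update_val → Spec_update_clusters old_list new_list update_val (update_clusters old_list new_list update_val)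

-- ===== LEMMAS AND PROOFS =====

-- reference form: the common value of both ports, new_list indexed from k
def refUC (ns : List Int) (v : Int) : List Int → Nat → List Int
  | [], _ => []
  | o :: os, k => if o = v then ns.getD k 0 :: refUC ns v os (k + 1) else o :: refUC ns v os k

-- marked positions of v in old, as Nat indices
def posUC (v : Int) : List Int → List Nat
  | [] => []
  | o :: os => if o = v then 0 :: (posUC v os).map (· + 1) else (posUC v os).map (· + 1)

-- apply the assignments out[pₖ] := f k for successive k
def applyUC (f : Nat → Int) : List Nat → Nat → List Int → List Int
  | [], _, out => out
  | p :: ps, k, out => applyUC f ps (k + 1) (out.set p (f k))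

theorem fold_A (ns : List Int) (v : Int) :
    ∀ (old : List Int) (acc : List Int) (k : Nat),
      (old.foldl
        (fun st o =>
          if o == v then (st.1 ++ [PySem.List.pyGetD ns st.2 0], st.2 + 1)
          else (st.1 ++ [o], st.2)) (acc, (k : Int))).1 = acc ++ refUC ns v old k := by
  intro old
  induction old with
  | nil => intro acc k; simp [refUC]
  | cons o os ih =>
    intro acc k
    have hk : ((k : Int) + 1) = ((k + 1 : Nat) : Int) := by push_cast; ring
    simp only [List.foldl_cons]
    by_cases h : (o == v) = true
    · have h' : o = v := by simpa using h
      rw [if_pos h, hk, ih]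
      simp [refUC, h', PySem.List.pyGetD_natCast]
    · have h' : ¬ o = v := by simpa using h
      rw [if_neg h, ih]
      simp [refUC, h']

theorem applyUC_shift (f : Nat → Int) :
    ∀ (ps : List Nat) (k : Nat) (x : Int) (out : List Int),
      applyUC f (ps.map (· + 1)) k (x :: out) = x :: applyUC f ps k out := by
  intro ps
  induction ps with
  | nil => intro k x out; simp [applyUC]
  | cons p ps ih => intro k x out; simp only [List.map_cons, applyUC, List.set_cons_succ]; exact ih _ _ _

theorem applyUC_pos (ns : List Int) (v : Int) :
    ∀ (old : List Int) (k : Nat),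
      applyUC (fun i => ns.getD i 0) (posUC v old) k old = refUC ns v old k := by
  intro old
  induction old with
  | nil => intro k; simp [posUC, applyUC, refUC]
  | cons o os ih =>
    intro k
    by_cases h : o = v
    · simp only [posUC, refUC, if_pos h, applyUC, List.set_cons_zero, applyUC_shift]
      rw [ih]
    · simp only [posUC, refUC, if_neg h, applyUC_shift]
      rw [ih]

theorem enum_filter (v : Int) :
    ∀ (old : List Int) (s : Int),
      ((PySem.List.enumerate old s).filter (fun p => p.2 == v)).map Prod.fst
        = (posUC v old).map (fun (n : Nat) => (n : Int) + s) := by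
  intro old
  induction old with
  | nil => intro s; simp [PySem.List.enumerate_nil, posUC]
  | cons o os ih =>
    intro s
    have hmap : ((posUC v os).map (fun n => n + 1)).map (fun (n : Nat) => (n : Int) + s)
        = (posUC v os).map (fun (n : Nat) => (n : Int) + (s + 1)) := by
      rw [List.map_map]
      exact List.map_congr_left (fun n _ => by simp only [Function.comp_apply]; push_cast; ring)
    by_cases h : (o == v) = true
    · have h' : o = v := by simpa using h
      simp only [PySem.List.enumerate_cons, List.filter_cons, h, if_pos, List.map_cons, ih,
        posUC, if_pos h', hmap]
      simp
    · have h' : ¬ o = v := by simpa using h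
      simp only [PySem.List.enumerate_cons, List.filter_cons, h, Bool.false_eq_true, if_false,
        posUC, if_neg h', hmap]
      exact ih (s + 1)

theorem fold_B (ns : List Int) :
    ∀ (ps : List Nat) (k : Nat) (out : List Int),
      (PySem.List.enumerate (ps.map (fun (n : Nat) => (n : Int))) (k : Int)).foldl
        (fun out ip => PySem.List.pySetD out ip.2 (PySem.List.pyGetD ns ip.1 0)) out
        = applyUC (fun i => ns.getD i 0) ps k out := by
  intro ps
  induction ps with
  | nil => intro k out; simp [PySem.List.enumerate_nil, applyUC]
  | cons p ps ih =>
    intro k out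
    have hk : ((k : Int) + 1) = ((k + 1 : Nat) : Int) := by push_cast; ring
    simp only [List.map_cons, PySem.List.enumerate_cons, List.foldl_cons, applyUC, hk,
      PySem.List.pySetD_natCast, PySem.List.pyGetD_natCast]
    exact ih (k + 1) _

-- ===== VERDICT (by name: the statement is the Claim_ definition above) =====
theorem update_clusters_spec : Claim_equal_update_clusters := by
  intro old ns v _ _
  unfold Spec_update_clusters update_clusters update_clusters_alt
  have hA := fold_A ns v old [] 0
  simp only [Int.natCast_zero] at hA
  rw [hA, List.nil_append]
  have hpos := enum_filter v old 0
  simp only [add_zero] at hpos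
  rw [hpos]
  have hB := fold_B ns (posUC v old) 0 old
  simp only [Int.natCast_zero] at hB
  rw [hB, applyUC_pos]
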